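-- pv_equiv track=rewrite | github.com/Revi1337/BaekJoon-Coding-Test | 백준/Gold/12869. 뮤탈리스크/뮤탈리스크.py | solution
-- ===== SOURCE A (Python) =====
-- from collections import deque
--
-- def solution(N, nums):
--
--     def backtrack(n, lst, check):
--         if n == N:
--             possible.append([*lst])
--             return
--         for idx in range(N):
--             if not check[idx]:
--                 check[idx] = 1
--                 lst.append(idx)
--                 backtrack(n + 1, lst, check)
--                 lst.pop()
--                 check[idx] = 0
--
--     possible = []
--     score = [9, 3, 1]
--     backtrack(0, [], [0] * N)
--
--     while len(nums) < 3:
--         nums.append(0)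
--
--     queue = deque()
--     a, b, c = nums
--     queue.append((a, b, c, 0))
--     check = {(a, b, c)}
--
--     while queue:
--         x, y, z, cnt = queue.popleft()
--         if x <= 0 and y <= 0 and z <= 0:
--             return cnt
--
--         for perm in possible:
--             nx, ny, nz = x, y, z
--             damage = [0, 0, 0]
--             for i in range(N):
--                 damage[perm[i]] = score[i]
--             nx = max(0, nx - damage[0])
--             ny = max(0, ny - damage[1])
--             nz = max(0, nz - damage[2])
--
--             state = (nx, ny, nz)
--             if state not in check:
--                 check.add(state)
--                 queue.append((nx, ny, nz, cnt + 1))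
--
--     return -1
-- ===== SOURCE B (Python) =====
-- def _perms(items):
--     # all permutations of items, functionally (lexicographic in index order)
--     if not items:
--         return [[]]
--     return [[items[i]] + rest
--             for i in range(len(items))
--             for rest in _perms(items[:i] + items[i + 1:])]
--
--
-- def solution(N, nums):
--     while len(nums) < 3:
--         nums.append(0)
--     score = [9, 3, 1]
--     moves = []
--     for perm in _perms(list(range(N))):
--         d = [0, 0, 0]
--         for i, p in enumerate(perm):
--             d[p] = score[i]
--         moves.append((d[0], d[1], d[2]))
--     a, b, c = nums
--     memo = {}
--
--     def f(x, y, z):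
--         if x <= 0 and y <= 0 and z <= 0:
--             return 0
--         if (x, y, z) in memo:
--             return memo[(x, y, z)]
--         best = -1
--         for d0, d1, d2 in moves:
--             nxt = (max(0, x - d0), max(0, y - d1), max(0, z - d2))
--             if nxt == (x, y, z):
--                 continue
--             sub = f(*nxt)
--             if sub != -1 and (best == -1 or sub + 1 < best):
--                 best = sub + 1
--         memo[(x, y, z)] = best
--         return best
--
--     return f(a, b, c)
-- ===== Notes on version B (the rewrite author's own statement) =====
-- stated objective: alternative
-- what changed: Replaces the explicit BFS (deque of states with per-node counters plus a visited set, and an in-place backtracking permutation generator) by top-down memoized recursion over the strictly shrinking health states, with permutations built by a pure recursive function.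
-- outside the precondition, e.g. on solution(5, []): A returns 0, B raises IndexError; on solution(4, [0, -1]): A returns 0, B raises IndexError
import Mathlib
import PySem

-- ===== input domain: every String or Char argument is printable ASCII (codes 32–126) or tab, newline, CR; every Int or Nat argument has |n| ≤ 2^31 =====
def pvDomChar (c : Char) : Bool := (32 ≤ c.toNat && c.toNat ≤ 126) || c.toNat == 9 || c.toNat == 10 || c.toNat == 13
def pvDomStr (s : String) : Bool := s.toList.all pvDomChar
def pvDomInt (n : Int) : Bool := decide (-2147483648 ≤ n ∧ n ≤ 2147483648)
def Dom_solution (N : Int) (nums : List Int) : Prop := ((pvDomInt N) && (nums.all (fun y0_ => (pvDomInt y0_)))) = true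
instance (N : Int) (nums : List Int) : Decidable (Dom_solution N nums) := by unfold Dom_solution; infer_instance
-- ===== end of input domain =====

-- B replaces A's queue BFS (deque + visited set, backtracking permutation generator) by top-down
-- memoized recursion over the shrinking health states; both Pythons pad `nums` in place to length 3
-- (the same argument mutation), and the equivalence is about the return value.

abbrev PVTrip := Int × Int × Int
abbrev PVQuad := Int × Int × Int × Int

-- ===== PORT A =====

-- while len(nums) < 3: nums.append(0)
def padTo3 (l : List Int) : List Int :=
  if l.length < 3 then padTo3 (l ++ [0]) else l
termination_by 3 - l.length
decreasing_by simp; omega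

def scoreA : List Int := [9, 3, 1]

-- `backtrack`, threading the mutated pair (check, possible); fuel = recursion-depth guard
def btA (N : Int) : ℕ → Int → List Int → List Int × List (List Int) → List Int × List (List Int)
  | 0, _, _, st => st
  | fuel+1, n, lst, st =>
    if n = N then (st.1, st.2 ++ [lst])
    else
      (PySem.List.pyRange 0 N 1).foldl (fun st idx =>
        if PySem.List.pyGetD st.1 idx 0 = 0 then
          let st1 := btA N fuel (n+1) (lst ++ [idx]) (PySem.List.pySetD st.1 idx 1, st.2)
          (PySem.List.pySetD st1.1 idx 0, st1.2)
        else st) st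

def possibleOf (N : Int) : List (List Int) :=
  (btA N (N.toNat + 1) 0 [] (PySem.List.pyRepeat [0] N, [])).2

-- damage = [0,0,0]; for i in range(N): damage[perm[i]] = score[i]
def dmgA (N : Int) (perm : List Int) : List Int :=
  (PySem.List.pyRange 0 N 1).foldl
    (fun damage i =>
      PySem.List.pySetD damage (PySem.List.pyGetD perm i 0) (PySem.List.pyGetD scoreA i 0))
    [0, 0, 0]

-- the BFS while-loop; the fuel argument is only a termination guard (chosen large enough below)
def bfsA (N : Int) (possible : List (List Int)) :
    ℕ → List PVQuad → PySem.Set PVTrip → Int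
  | 0, _, _ => -1
  | _+1, [], _ => -1
  | fuel+1, (x, y, z, cnt) :: rest, check =>
    if x ≤ 0 ∧ y ≤ 0 ∧ z ≤ 0 then cnt
    else
      let st := possible.foldl (fun (st : List PVQuad × PySem.Set PVTrip) perm =>
          let damage := dmgA N perm
          let nx := max 0 (x - PySem.List.pyGetD damage 0 0)
          let ny := max 0 (y - PySem.List.pyGetD damage 1 0)
          let nz := max 0 (z - PySem.List.pyGetD damage 2 0)
          if PySem.Set.contains st.2 (nx, ny, nz) then st
          else (st.1 ++ [(nx, ny, nz, cnt + 1)], PySem.Set.add st.2 (nx, ny, nz)))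
        (rest, check)
      bfsA N possible fuel st.1 st.2

def solution (N : Int) (nums : List Int) : Int :=
  let possible := possibleOf N
  match padTo3 nums with
  | [a, b, c] =>
    let M := max 0 (max a (max b c))
    bfsA N possible (2 * ((M+1) * (M+1) * (M+1)).toNat + 8)
      [(a, b, c, 0)] (PySem.Set.ofList [(a, b, c)])
  | _ => 0

-- ===== PORT B =====

-- _perms: [[items[i]] + rest for i in range(len(items)) for rest in _perms(items[:i] + items[i+1:])]
def permsB : ℕ → List Int → List (List Int)
  | 0, _ => []
  | fuel+1, items =>
    if items.length = 0 then [[]]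
    else
      (PySem.List.pyRange 0 (items.length : Int) 1).flatMap (fun i =>
        (permsB fuel
            (PySem.List.slice items none (some i) ++ PySem.List.slice items (some (i+1)) none)).map
          (fun rest => PySem.List.pyGetD items i 0 :: rest))

-- d = [0,0,0]; for i, p in enumerate(perm): d[p] = score[i]; move = (d[0], d[1], d[2])
def dmgB (perm : List Int) : Int × Int × Int :=
  let d := (PySem.List.enumerate perm 0).foldl
      (fun d ip => PySem.List.pySetD d ip.2 (PySem.List.pyGetD [9, 3, 1] ip.1 0)) [0, 0, 0]
  (PySem.List.pyGetD d 0 0, PySem.List.pyGetD d 1 0, PySem.List.pyGetD d 2 0)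

def movesB (N : Int) : List (Int × Int × Int) :=
  let items := PySem.List.pyRange 0 N 1
  (permsB (items.length + 1) items).map dmgB

-- recursion-depth bound for f: total remaining positive health + number of negative coordinates
def mmB (s : Int × Int × Int) : ℕ :=
  (max 0 s.1 + max 0 s.2.1 + max 0 s.2.2).toNat
    + (if s.1 < 0 then 1 else 0) + (if s.2.1 < 0 then 1 else 0) + (if s.2.2 < 0 then 1 else 0)

-- the memoized recursion f, threading the memo dict; fuel is only a termination guard
def fB (moves : List (Int × Int × Int)) :
    ℕ → Int × Int × Int → PySem.Dict (Int × Int × Int) Int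
      → Int × PySem.Dict (Int × Int × Int) Int
  | 0, _, memo => (-1, memo)
  | fuel+1, (x, y, z), memo =>
    if x ≤ 0 ∧ y ≤ 0 ∧ z ≤ 0 then (0, memo)
    else
      match memo.get? (x, y, z) with
      | some v => (v, memo)
      | none =>
        let st := moves.foldl (fun (st : Int × PySem.Dict PVTrip Int) mv =>
            let nxt := (max 0 (x - mv.1), max 0 (y - mv.2.1), max 0 (z - mv.2.2))
            if nxt = (x, y, z) then st
            else
              let r := fB moves fuel nxt st.2
              (if r.1 ≠ -1 ∧ (st.1 = -1 ∨ r.1 + 1 < st.1) then r.1 + 1 else st.1, r.2))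
          (-1, memo)
        (st.1, st.2.insert (x, y, z) st.1)

-- B's own padding loop: while len(nums) < 3: nums.append(0)
def padTo3B (l : List Int) : List Int :=
  if l.length < 3 then padTo3B (l ++ [0]) else l
termination_by 3 - l.length
decreasing_by simp; omega

def solution_alt (N : Int) (nums : List Int) : Int :=
  let moves := movesB N
  let p := padTo3B nums
  -- a, b, c = nums  (length-3 guard totalizes the unpacking; Python raises otherwise)
  if p.length = 3 then
    (fB moves (mmB (p.getD 0 0, p.getD 1 0, p.getD 2 0) + 1)
      (p.getD 0 0, p.getD 1 0, p.getD 2 0) PySem.Dict.empty).1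
  else 0

-- ===== PRECONDITION & SPEC =====
-- Pre_ excludes exactly the inputs on which A raises (len(nums) > 3: ValueError unpacking a,b,c;
-- N ≥ 4 with a not-yet-dead padded state: IndexError building `damage`), plus the corner N ≥ 4 with
-- an already-dead padded state, where A returns 0 before touching `damage` but B, which builds its
-- move table first, itself raises the same IndexError.
def Pre_solution (N : Int) (nums : List Int) : Prop := N ≤ 3 ∧ nums.length ≤ 3
instance (N : Int) (nums : List Int) : Decidable (Pre_solution N nums) := by
  unfold Pre_solution; infer_instance

def pvWitness_solution : Int × List Int := (3, [12, 10, 4])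

def Spec_solution (N : Int) (nums : List Int) (out : Int) : Prop := out = solution_alt N nums
instance (N : Int) (nums : List Int) (out : Int) : Decidable (Spec_solution N nums out) := by
  unfold Spec_solution; infer_instance

-- ===== CLAIM (what is proved, stated in full; the proofs are below) =====
def Claim_equal_solution : Prop := ∀ (N : Int) (nums : List Int), Dom_solution N nums → Pre_solution N nums → Spec_solution N nums (solution N nums)

-- ===== LEMMAS AND PROOFS =====

-- ---- generic state-graph vocabulary ----

def stepT (s mv : PVTrip) : PVTrip :=
  (max 0 (s.1 - mv.1), max 0 (s.2.1 - mv.2.1), max 0 (s.2.2 - mv.2.2))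

def doneT (s : PVTrip) : Prop := s.1 ≤ 0 ∧ s.2.1 ≤ 0 ∧ s.2.2 ≤ 0


def NonnegMv (mv : PVTrip) : Prop := 0 ≤ mv.1 ∧ 0 ≤ mv.2.1 ∧ 0 ≤ mv.2.2

-- "some SCV-kill sequence of length ≤ k works from s"
def RK (moves : List PVTrip) : ℕ → PVTrip → Prop
  | 0, s => doneT s
  | k+1, s => doneT s ∨ ∃ mv ∈ moves, RK moves k (stepT s mv)

noncomputable def distSpec (moves : List PVTrip) (s : PVTrip) : Int := by
  classical
  exact if h : ∃ k, RK moves k s then (Nat.find h : Int) else -1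

-- exact-length reachability (paths in the state graph)
def reachT (moves : List PVTrip) : ℕ → PVTrip → PVTrip → Prop
  | 0, s, t => t = s
  | k+1, s, t => ∃ mv ∈ moves, reachT moves k (stepT s mv) t

def edgeT (moves : List PVTrip) (s t : PVTrip) : Prop := ∃ mv ∈ moves, stepT s mv = t

noncomputable def sd? (moves : List PVTrip) (s0 t : PVTrip) : Option ℕ := by
  classical
  exact if h : ∃ k, reachT moves k s0 t then some (Nat.find h) else none

-- generic BFS body (A's loop with the damage vectors precomputed)
def bfsG (moves : List PVTrip) : ℕ → List PVQuad → List PVTrip → Int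
  | 0, _, _ => -1
  | _+1, [], _ => -1
  | fuel+1, (x, y, z, cnt) :: rest, check =>
    if x ≤ 0 ∧ y ≤ 0 ∧ z ≤ 0 then cnt
    else
      let st := moves.foldl (fun (st : List PVQuad × PySem.Set PVTrip) mv =>
          let nx := max 0 (x - mv.1)
          let ny := max 0 (y - mv.2.1)
          let nz := max 0 (z - mv.2.2)
          if PySem.Set.contains st.2 (nx, ny, nz) then st
          else (st.1 ++ [(nx, ny, nz, cnt + 1)], PySem.Set.add st.2 (nx, ny, nz)))
        (rest, check)
      bfsG moves fuel st.1 st.2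

def movesA (N : Int) : List PVTrip :=
  (possibleOf N).map (fun perm =>
    let damage := dmgA N perm
    (PySem.List.pyGetD damage 0 0, PySem.List.pyGetD damage 1 0, PySem.List.pyGetD damage 2 0))

theorem bfsA_eq_bfsG (N : Int) :
    ∀ fuel q check, bfsA N (possibleOf N) fuel q check = bfsG (movesA N) fuel q check := by
  intro fuel
  induction fuel with
  | zero => intro q check; rfl
  | succ fuel ih =>
    intro q check
    match q with
    | [] => rfl
    | (x, y, z, cnt) :: rest =>
      simp only [bfsA, bfsG]
      by_cases hd : x ≤ 0 ∧ y ≤ 0 ∧ z ≤ 0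
      · rw [if_pos hd, if_pos hd]
      · rw [if_neg hd, if_neg hd]
        have hst : (possibleOf N).foldl (fun (st : List PVQuad × PySem.Set PVTrip) perm =>
            let damage := dmgA N perm
            let nx := max 0 (x - PySem.List.pyGetD damage 0 0)
            let ny := max 0 (y - PySem.List.pyGetD damage 1 0)
            let nz := max 0 (z - PySem.List.pyGetD damage 2 0)
            if PySem.Set.contains st.2 (nx, ny, nz) then st
            else (st.1 ++ [(nx, ny, nz, cnt + 1)], PySem.Set.add st.2 (nx, ny, nz)))
          (rest, check)
            = (movesA N).foldl (fun (st : List PVQuad × PySem.Set PVTrip) mv =>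
            let nx := max 0 (x - mv.1)
            let ny := max 0 (y - mv.2.1)
            let nz := max 0 (z - mv.2.2)
            if PySem.Set.contains st.2 (nx, ny, nz) then st
            else (st.1 ++ [(nx, ny, nz, cnt + 1)], PySem.Set.add st.2 (nx, ny, nz)))
          (rest, check) := by
          rw [movesA, List.foldl_map]
        rw [hst]
        exact ih _ _


-- ---- basic facts about RK / distSpec ----


theorem distSpec_done (moves : List PVTrip) (s : PVTrip) (h : doneT s) :
    distSpec moves s = 0 := by
  classical
  unfold distSpec
  have hex : ∃ k, RK moves k s := ⟨0, h⟩
  simp only [dif_pos hex]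
  norm_num [Nat.find_eq_zero hex]
  exact h

theorem distSpec_le_of_RK (moves : List PVTrip) (k : ℕ) (s : PVTrip) (h : RK moves k s) :
    0 ≤ distSpec moves s ∧ distSpec moves s ≤ (k : Int) := by
  classical
  unfold distSpec
  have hex : ∃ k, RK moves k s := ⟨k, h⟩
  simp only [dif_pos hex]
  constructor
  · positivity
  · exact_mod_cast Nat.find_le h

theorem distSpec_neg_iff (moves : List PVTrip) (s : PVTrip) :
    distSpec moves s = -1 ↔ ¬ ∃ k, RK moves k s := by
  classical
  unfold distSpec
  by_cases hex : ∃ k, RK moves k s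
  · simp only [dif_pos hex]
    constructor
    · intro h; exfalso; omega
    · intro h; exact absurd hex h
  · simp [hex]

theorem distSpec_RK_toNat (moves : List PVTrip) (s : PVTrip)
    (h : distSpec moves s ≠ -1) :
    0 ≤ distSpec moves s ∧ RK moves (distSpec moves s).toNat s := by
  classical
  have hex : ∃ k, RK moves k s := by
    by_contra hc; exact h ((distSpec_neg_iff moves s).2 hc)
  unfold distSpec
  simp only [dif_pos hex]
  refine ⟨by positivity, ?_⟩
  simpa using Nat.find_spec hex

theorem distSpec_finite_step (moves : List PVTrip) (s : PVTrip)
    (hnd : ¬ doneT s) (hex : ∃ k, RK moves k s) :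
    ∃ mv ∈ moves, stepT s mv ≠ s ∧
      distSpec moves (stepT s mv) + 1 = distSpec moves s := by
  classical
  have hds : distSpec moves s = (Nat.find hex : Int) := by
    unfold distSpec; simp only [dif_pos hex]
  set k0 := Nat.find hex with hk0
  have hRk0 : RK moves k0 s := Nat.find_spec hex
  have hk0pos : k0 ≠ 0 := by
    intro h0; rw [h0] at hRk0; exact hnd hRk0
  obtain ⟨k1, hk1⟩ : ∃ k1, k0 = k1 + 1 := ⟨k0 - 1, by omega⟩
  rw [hk1] at hRk0
  rcases hRk0 with h | ⟨mv, hmv, hr⟩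
  · exact absurd h hnd
  · have hne : stepT s mv ≠ s := by
      intro he
      rw [he] at hr
      have := Nat.find_le (h := hex) hr
      omega
    refine ⟨mv, hmv, hne, ?_⟩
    -- distSpec (step) = k1
    have hex' : ∃ k, RK moves k (stepT s mv) := ⟨k1, hr⟩
    have hds' : distSpec moves (stepT s mv) = (Nat.find hex' : Int) := by
      unfold distSpec; simp only [dif_pos hex']
    have hle : Nat.find hex' ≤ k1 := Nat.find_le hr
    have hge : k1 ≤ Nat.find hex' := by
      by_contra hlt
      push_neg at hlt
      have : RK moves (Nat.find hex' + 1) s :=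
        Or.inr ⟨mv, hmv, Nat.find_spec hex'⟩
      have := Nat.find_le (h := hex) this
      omega
    rw [hds, hds', hk1]
    have : Nat.find hex' = k1 := le_antisymm hle hge
    rw [this]; push_cast; ring

theorem mm_step_lt (s mv : PVTrip) (hmv : NonnegMv mv) (hne : stepT s mv ≠ s) :
    mmB (stepT s mv) < mmB s := by
  obtain ⟨x, y, z⟩ := s
  obtain ⟨a, b, c⟩ := mv
  obtain ⟨ha, hb, hc⟩ := hmv
  simp only [stepT, mmB, Prod.mk.injEq, not_and, ne_eq] at hne ⊢
  simp only [] at ha hb hc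
  rw [if_neg (by omega : ¬ max 0 (x - a) < 0), if_neg (by omega : ¬ max 0 (y - b) < 0),
      if_neg (by omega : ¬ max 0 (z - c) < 0)]
  by_cases hx : x < 0 <;> by_cases hy : y < 0 <;> by_cases hz : z < 0 <;>
    simp only [hx, hy, hz, if_pos, if_false] <;> omega

-- ---- memoized recursion correctness ----

def ValidMemo (moves : List PVTrip) (memo : PySem.Dict PVTrip Int) : Prop :=
  ∀ s v, memo.get? s = some v → v = distSpec moves s

theorem distSpec_neg_or_nonneg (moves : List PVTrip) (s : PVTrip) :
    distSpec moves s = -1 ∨ 0 ≤ distSpec moves s := by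
  by_cases h : distSpec moves s = -1
  · exact Or.inl h
  · exact Or.inr (distSpec_RK_toNat moves s h).1

theorem distSpec_pos (moves : List PVTrip) (s : PVTrip) (hnd : ¬ doneT s)
    (hex : ∃ k, RK moves k s) : 1 ≤ distSpec moves s := by
  classical
  unfold distSpec
  simp only [dif_pos hex]
  have h0 : Nat.find hex ≠ 0 := by
    intro h0
    have := Nat.find_spec hex
    rw [h0] at this
    exact hnd this
  exact_mod_cast Nat.one_le_iff_ne_zero.2 h0

-- pure version of the best-updating fold in f
def goB (vals : List Int) (b : Int) : Int :=
  vals.foldl (fun best sub => if sub ≠ -1 ∧ (best = -1 ∨ sub + 1 < best) then sub + 1 else best) b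

theorem goB_cons (v : Int) (vs : List Int) (b : Int) :
    goB (v :: vs) b = goB vs (if v ≠ -1 ∧ (b = -1 ∨ v + 1 < b) then v + 1 else b) := rfl

theorem goB_neg (vals : List Int) (h : ∀ v ∈ vals, v = -1) : goB vals (-1) = -1 := by
  induction vals with
  | nil => rfl
  | cons v vs ih =>
    rw [goB_cons, if_neg (by simp [h v (by simp)])]
    exact ih (fun w hw => h w (by simp [hw]))

theorem goB_le_start (vals : List Int) (hv : ∀ v ∈ vals, v = -1 ∨ 0 ≤ v) :
    ∀ b, 0 ≤ b → 0 ≤ goB vals b ∧ goB vals b ≤ b := by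
  induction vals with
  | nil => intro b hb; exact ⟨hb, le_refl _⟩
  | cons v vs ih =>
    intro b hb
    have hvs : ∀ w ∈ vs, w = -1 ∨ 0 ≤ w := fun w hw => hv w (by simp [hw])
    have hv0 := hv v (by simp)
    rw [goB_cons]
    split_ifs with h
    · have := ih hvs (v + 1) (by omega)
      omega
    · exact ih hvs b hb

theorem goB_le_mem (vals : List Int) (hv : ∀ v ∈ vals, v = -1 ∨ 0 ≤ v) :
    ∀ b, (b = -1 ∨ 0 ≤ b) → ∀ v ∈ vals, 0 ≤ v → 0 ≤ goB vals b ∧ goB vals b ≤ v + 1 := by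
  induction vals with
  | nil => intro _ _ v hv; simp at hv
  | cons w vs ih =>
    intro b hb v hmem hv0
    have hvs : ∀ u ∈ vs, u = -1 ∨ 0 ≤ u := fun u hu => hv u (by simp [hu])
    rcases List.mem_cons.1 hmem with he | hvs'
    · subst he
      rw [goB_cons]
      split_ifs with h
      · have := goB_le_start vs hvs (v + 1) (by omega); omega
      · have hbv : b ≠ -1 ∧ b ≤ v + 1 := by
          constructor
          · intro hb1; exact h ⟨by omega, Or.inl hb1⟩
          · by_contra hlt; exact h ⟨by omega, Or.inr (by omega)⟩
        have := goB_le_start vs hvs b (by omega); omega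
    · rw [goB_cons]
      split_ifs with h
      · have hw0 := hv w (by simp)
        exact ih hvs (w + 1) (by omega) v hvs' hv0
      · exact ih hvs b hb v hvs' hv0

theorem goB_achieved (vals : List Int) :
    ∀ b, goB vals b = b ∨ ∃ v ∈ vals, v ≠ -1 ∧ goB vals b = v + 1 := by
  induction vals with
  | nil => intro b; exact Or.inl rfl
  | cons v vs ih =>
    intro b
    rw [goB_cons]
    split_ifs with h
    · rcases ih (v + 1) with he | ⟨w, hw, hw1, hw2⟩
      · exact Or.inr ⟨v, by simp, h.1, he⟩
      · exact Or.inr ⟨w, by simp [hw], hw1, hw2⟩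
    · rcases ih b with he | ⟨w, hw, hw1, hw2⟩
      · exact Or.inl he
      · exact Or.inr ⟨w, by simp [hw], hw1, hw2⟩

theorem valid_insert (M : List PVTrip) (memo : PySem.Dict PVTrip Int) (s : PVTrip) (v : Int)
    (h : ValidMemo M memo) (hv : v = distSpec M s) :
    ValidMemo M (memo.insert s v) := by
  intro t w hw
  rw [PySem.Dict.get?_insert] at hw
  split_ifs at hw with he
  · cases hw; subst he; exact hv
  · exact h t w hw

noncomputable def pvVals (M : List PVTrip) (s : PVTrip) (moves : List PVTrip) : List Int :=
  moves.filterMap (fun mv => if stepT s mv = s then none else some (distSpec M (stepT s mv)))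

theorem pvVals_good (M : List PVTrip) (s : PVTrip) (moves : List PVTrip) :
    ∀ v ∈ pvVals M s moves, v = -1 ∨ 0 ≤ v := by
  intro v hv
  rcases List.mem_filterMap.1 hv with ⟨mv, _, hif⟩
  by_cases hs : stepT s mv = s
  · rw [if_pos hs] at hif; cases hif
  · rw [if_neg hs] at hif
    cases hif
    exact distSpec_neg_or_nonneg M _

theorem fB_fold_char (M : List PVTrip) (hmvall : ∀ mv ∈ M, NonnegMv mv) (fuel : ℕ) (x y z : Int)
    (hrec : ∀ s memo, mmB s < fuel → ValidMemo M memo →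
      (fB M fuel s memo).1 = distSpec M s ∧ ValidMemo M (fB M fuel s memo).2)
    (hmm : mmB (x, y, z) ≤ fuel) :
    ∀ (moves : List PVTrip), (∀ mv ∈ moves, mv ∈ M) →
      ∀ (b : Int) (memo : PySem.Dict PVTrip Int), ValidMemo M memo →
      ∃ memo', (moves.foldl (fun (st : Int × PySem.Dict PVTrip Int) mv =>
          let nxt := (max 0 (x - mv.1), max 0 (y - mv.2.1), max 0 (z - mv.2.2))
          if nxt = (x, y, z) then st
          else
            let r := fB M fuel nxt st.2
            (if r.1 ≠ -1 ∧ (st.1 = -1 ∨ r.1 + 1 < st.1) then r.1 + 1 else st.1, r.2))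
        (b, memo)) = (goB (pvVals M (x, y, z) moves) b, memo') ∧ ValidMemo M memo' := by
  intro moves
  induction moves with
  | nil => intro _ b memo hval; exact ⟨memo, rfl, hval⟩
  | cons mv ms ih =>
    intro hsub b memo hval
    have hmvM : mv ∈ M := hsub mv (by simp)
    have hms : ∀ m ∈ ms, m ∈ M := fun m hm => hsub m (by simp [hm])
    by_cases ht : stepT (x, y, z) mv = (x, y, z)
    · simp only [List.foldl_cons]
      rw [if_pos (by simpa [stepT] using ht)]
      have : pvVals M (x, y, z) (mv :: ms) = pvVals M (x, y, z) ms := by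
        simp [pvVals, ht]
      rw [this]
      exact ih hms b memo hval
    · have hmmlt : mmB (stepT (x, y, z) mv) < fuel :=
        lt_of_lt_of_le (mm_step_lt _ _ (hmvall mv hmvM) ht) hmm
      have hr := hrec (stepT (x, y, z) mv) memo hmmlt hval
      simp only [List.foldl_cons]
      rw [if_neg (by simpa [stepT] using ht)]
      have hvals : pvVals M (x, y, z) (mv :: ms)
          = distSpec M (stepT (x, y, z) mv) :: pvVals M (x, y, z) ms := by
        simp [pvVals, ht]
      rw [hvals, goB_cons]
      have hfst : (fB M fuel (stepT (x, y, z) mv) memo).1 = distSpec M (stepT (x, y, z) mv) := hr.1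
      obtain ⟨memo', hfold, hval'⟩ := ih hms
        (if (fB M fuel (stepT (x, y, z) mv) memo).1 ≠ -1 ∧
            (b = -1 ∨ (fB M fuel (stepT (x, y, z) mv) memo).1 + 1 < b)
         then (fB M fuel (stepT (x, y, z) mv) memo).1 + 1 else b)
        (fB M fuel (stepT (x, y, z) mv) memo).2 hr.2
      refine ⟨memo', ?_, hval'⟩
      have hfst' : (fB M fuel (max 0 (x - mv.1), max 0 (y - mv.2.1), max 0 (z - mv.2.2)) memo).1
          = distSpec M (max 0 (x - mv.1), max 0 (y - mv.2.1), max 0 (z - mv.2.2)) := by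
        simpa [stepT] using hfst
      convert hfold using 3 <;> simp [stepT, hfst']

theorem fB_correct (moves : List PVTrip) (hmv : ∀ mv ∈ moves, NonnegMv mv) :
    ∀ fuel s memo, mmB s < fuel → ValidMemo moves memo →
      (fB moves fuel s memo).1 = distSpec moves s ∧ ValidMemo moves (fB moves fuel s memo).2 := by
  intro fuel
  induction fuel with
  | zero => intro s memo h; omega
  | succ fuel ih =>
    intro s memo hlt hval
    obtain ⟨x, y, z⟩ := s
    by_cases hd : x ≤ 0 ∧ y ≤ 0 ∧ z ≤ 0
    · simp only [fB, if_pos hd]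
      exact ⟨(distSpec_done moves _ (show doneT (x, y, z) from hd)).symm, hval⟩
    · cases hget : PySem.Dict.get? memo (x, y, z) with
      | some v =>
        simp only [fB, if_neg hd, hget]
        exact ⟨hval _ _ hget, hval⟩
      | none =>
        obtain ⟨memo', hfold, hval'⟩ :=
          fB_fold_char moves hmv fuel x y z ih (by omega) moves (fun _ h => h) (-1) memo hval
        have hbest : goB (pvVals moves (x, y, z) moves) (-1) = distSpec moves (x, y, z) := by
          by_cases hex : ∃ k, RK moves k (x, y, z)
          · obtain ⟨mv0, hmv0, hne0, hd0⟩ := distSpec_finite_step moves (x, y, z) hd hex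
            have hv0 : distSpec moves (stepT (x, y, z) mv0) ∈ pvVals moves (x, y, z) moves := by
              apply List.mem_filterMap.2
              exact ⟨mv0, hmv0, by rw [if_neg hne0]⟩
            have hd0' : 0 ≤ distSpec moves (stepT (x, y, z) mv0) := by
              have h1 := distSpec_pos moves (x, y, z) hd hex
              omega
            have hub := goB_le_mem (pvVals moves (x, y, z) moves) (pvVals_good _ _ _)
              (-1) (Or.inl rfl) _ hv0 hd0'
            have hlb : distSpec moves (x, y, z) ≤ goB (pvVals moves (x, y, z) moves) (-1) := by
              rcases goB_achieved (pvVals moves (x, y, z) moves) (-1) with he | ⟨v, hvm, hv1, hv2⟩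
              · omega
              · rcases List.mem_filterMap.1 hvm with ⟨mv1, hmv1, hif⟩
                by_cases hs1 : stepT (x, y, z) mv1 = (x, y, z)
                · rw [if_pos hs1] at hif; cases hif
                · rw [if_neg hs1] at hif
                  cases hif
                  have hRK := (distSpec_RK_toNat moves _ hv1).2
                  have hnn := (distSpec_RK_toNat moves _ hv1).1
                  have : RK moves ((distSpec moves (stepT (x, y, z) mv1)).toNat + 1) (x, y, z) :=
                    Or.inr ⟨mv1, hmv1, hRK⟩
                  have := (distSpec_le_of_RK moves _ _ this).2
                  push_cast at this
                  omega
            omega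
          · have hneg : distSpec moves (x, y, z) = -1 := (distSpec_neg_iff moves _).2 hex
            rw [hneg]
            apply goB_neg
            intro v hvm
            rcases List.mem_filterMap.1 hvm with ⟨mv1, hmv1, hif⟩
            by_cases hs1 : stepT (x, y, z) mv1 = (x, y, z)
            · rw [if_pos hs1] at hif; cases hif
            · rw [if_neg hs1] at hif
              cases hif
              by_contra hv1
              have hRK := (distSpec_RK_toNat moves _ hv1).2
              exact hex ⟨(distSpec moves (stepT (x, y, z) mv1)).toNat + 1,
                Or.inr ⟨mv1, hmv1, hRK⟩⟩
        refine ⟨?_, ?_⟩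
        · simp only [fB, if_neg hd, hget, hfold]
          exact hbest
        · simp only [fB, if_neg hd, hget, hfold]
          exact valid_insert moves memo' (x, y, z) _ hval' hbest

-- ---- the two move tables ----

theorem movesA_nil (N : Int) (h : N < 0) : movesA N = [] := by
  have ht : N.toNat = 0 := Int.toNat_of_nonpos (by omega)
  have hr : PySem.List.pyRange 0 N 1 = [] := PySem.List.pyRange_one_eq_nil (by omega)
  simp [movesA, possibleOf, ht, btA, (show ¬ (0 : Int) = N by omega), hr]

theorem movesB_zero (N : Int) (h : N ≤ 0) : movesB N = [(0, 0, 0)] := by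
  have hr : PySem.List.pyRange 0 N 1 = [] := PySem.List.pyRange_one_eq_nil (by omega)
  simp only [movesB, hr]
  decide

theorem RK_nil_iff (k : ℕ) (s : PVTrip) : RK [] k s ↔ doneT s := by
  induction k with
  | zero => exact Iff.rfl
  | succ k ih =>
    constructor
    · rintro (h | ⟨mv, hmv, _⟩)
      · exact h
      · simp at hmv
    · exact Or.inl

theorem done_step_zero (s : PVTrip) : doneT (stepT s (0, 0, 0)) ↔ doneT s := by
  obtain ⟨x, y, z⟩ := s
  simp only [stepT, doneT]
  omega

theorem RK_zero_iff (k : ℕ) (s : PVTrip) : RK [(0, 0, 0)] k s ↔ doneT s := by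
  induction k generalizing s with
  | zero => exact Iff.rfl
  | succ k ih =>
    constructor
    · rintro (h | ⟨mv, hmv, hr⟩)
      · exact h
      · simp only [List.mem_singleton] at hmv
        subst hmv
        exact (done_step_zero s).1 ((ih _).1 hr)
    · exact Or.inl

theorem distSpec_nil_zero (s : PVTrip) : distSpec [] s = distSpec [(0, 0, 0)] s := by
  by_cases hd : doneT s
  · rw [distSpec_done _ _ hd, distSpec_done _ _ hd]
  · rw [(distSpec_neg_iff _ _).2, (distSpec_neg_iff _ _).2]
    · rintro ⟨k, hk⟩; exact hd ((RK_zero_iff k s).1 hk)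
    · rintro ⟨k, hk⟩; exact hd ((RK_nil_iff k s).1 hk)

-- ---- reachability and levels ----

theorem reach_succ_iff (moves : List PVTrip) (k : ℕ) (s0 t : PVTrip) :
    reachT moves (k+1) s0 t ↔ ∃ u, reachT moves k s0 u ∧ edgeT moves u t := by
  induction k generalizing s0 with
  | zero =>
    constructor
    · rintro ⟨mv, hmv, hr⟩
      have hr' : t = stepT s0 mv := hr
      exact ⟨s0, rfl, mv, hmv, hr'.symm⟩
    · rintro ⟨u, hu, mv, hmv, he⟩
      have hu' : u = s0 := hu
      subst hu'
      exact ⟨mv, hmv, show t = stepT u mv from he.symm⟩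
  | succ k ih =>
    constructor
    · rintro ⟨mv, hmv, hr⟩
      obtain ⟨u, hu, he⟩ := (ih (stepT s0 mv)).1 hr
      exact ⟨u, ⟨mv, hmv, hu⟩, he⟩
    · rintro ⟨u, ⟨mv, hmv, hu⟩, he⟩
      exact ⟨mv, hmv, (ih (stepT s0 mv)).2 ⟨u, hu, he⟩⟩

theorem sd?_spec (moves : List PVTrip) (s0 t : PVTrip) (d : ℕ) (h : sd? moves s0 t = some d) :
    reachT moves d s0 t ∧ ∀ j, reachT moves j s0 t → d ≤ j := by
  classical
  unfold sd? at h
  by_cases hex : ∃ k, reachT moves k s0 t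
  · simp only [dif_pos hex, Option.some.injEq] at h
    subst h
    exact ⟨Nat.find_spec hex, fun j hj => Nat.find_le (h := hex) hj⟩
  · simp only [dif_neg hex] at h
    cases h

theorem sd?_of_reach (moves : List PVTrip) (s0 t : PVTrip) (k : ℕ)
    (h : reachT moves k s0 t) : ∃ d, d ≤ k ∧ sd? moves s0 t = some d := by
  classical
  unfold sd?
  have hex : ∃ j, reachT moves j s0 t := ⟨k, h⟩
  simp only [dif_pos hex]
  exact ⟨Nat.find hex, Nat.find_le (h := hex) h, rfl⟩

theorem sd?_self (moves : List PVTrip) (s0 : PVTrip) : sd? moves s0 s0 = some 0 := by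
  have h0 : reachT moves 0 s0 s0 := rfl
  obtain ⟨d, hd, hsd⟩ := sd?_of_reach moves s0 s0 0 h0
  interval_cases d
  exact hsd

theorem sd?_zero (moves : List PVTrip) (s0 t : PVTrip) (h : sd? moves s0 t = some 0) :
    t = s0 :=
  (sd?_spec moves s0 t 0 h).1

theorem sd?_fun (moves : List PVTrip) (s0 t : PVTrip) (d d' : ℕ)
    (h : sd? moves s0 t = some d) (h' : sd? moves s0 t = some d') : d = d' := by
  rw [h] at h'; cases h'; rfl

theorem sd?_pred (moves : List PVTrip) (s0 t : PVTrip) (d : ℕ)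
    (h : sd? moves s0 t = some (d+1)) :
    ∃ u, sd? moves s0 u = some d ∧ edgeT moves u t := by
  obtain ⟨hr, hmin⟩ := sd?_spec moves s0 t (d+1) h
  obtain ⟨u, hu, he⟩ := (reach_succ_iff moves d s0 t).1 hr
  obtain ⟨d', hd', hsd⟩ := sd?_of_reach moves s0 u d hu
  have hru : reachT moves d' s0 u := (sd?_spec moves s0 u d' hsd).1
  have : reachT moves (d'+1) s0 t := (reach_succ_iff moves d' s0 t).2 ⟨u, hru, he⟩
  have := hmin (d'+1) this
  have hdd : d' = d := by omega
  subst hdd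
  exact ⟨u, hsd, he⟩

theorem sd?_edge (moves : List PVTrip) (s0 s : PVTrip) (d : ℕ)
    (h : sd? moves s0 s = some d) (mv : PVTrip) (hmv : mv ∈ moves) :
    ∃ e, e ≤ d + 1 ∧ sd? moves s0 (stepT s mv) = some e := by
  have hr : reachT moves d s0 s := (sd?_spec moves s0 s d h).1
  have : reachT moves (d+1) s0 (stepT s mv) :=
    (reach_succ_iff moves d s0 (stepT s mv)).2 ⟨s, hr, mv, hmv, rfl⟩
  exact sd?_of_reach moves s0 (stepT s mv) (d+1) this

theorem level_exists_of_le (moves : List PVTrip) (s0 : PVTrip) :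
    ∀ (e : ℕ) (t : PVTrip), sd? moves s0 t = some e → ∀ j ≤ e, ∃ u, sd? moves s0 u = some j := by
  intro e
  induction e with
  | zero => intro t ht j hj; interval_cases j; exact ⟨t, ht⟩
  | succ e ih =>
    intro t ht j hj
    rcases Nat.lt_or_ge j (e+1) with hlt | hge
    · obtain ⟨u, hu, _⟩ := sd?_pred moves s0 t e ht
      exact ih u hu j (by omega)
    · have : j = e + 1 := by omega
      subst this
      exact ⟨t, ht⟩

theorem RK_iff_reach_done (moves : List PVTrip) :
    ∀ (k : ℕ) (s : PVTrip), RK moves k s ↔ ∃ j ≤ k, ∃ t, reachT moves j s t ∧ doneT t := by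
  intro k
  induction k with
  | zero =>
    intro s
    constructor
    · intro h; exact ⟨0, le_refl _, s, rfl, h⟩
    · rintro ⟨j, hj, t, hr, hd⟩
      interval_cases j
      have : t = s := hr
      subst this; exact hd
  | succ k ih =>
    intro s
    constructor
    · rintro (h | ⟨mv, hmv, hr⟩)
      · exact ⟨0, by omega, s, rfl, h⟩
      · obtain ⟨j, hj, t, hrt, hdt⟩ := (ih (stepT s mv)).1 hr
        exact ⟨j+1, by omega, t, ⟨mv, hmv, hrt⟩, hdt⟩
    · rintro ⟨j, hj, t, hr, hd⟩
      match j with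
      | 0 =>
        have : t = s := hr
        subst this; exact Or.inl hd
      | j+1 =>
        obtain ⟨mv, hmv, hr'⟩ := hr
        exact Or.inr ⟨mv, hmv, (ih (stepT s mv)).2 ⟨j, by omega, t, hr', hd⟩⟩

theorem distSpec_eq_done_level (moves : List PVTrip) (s0 : PVTrip) (d : ℕ)
    (hreach : ∃ t, reachT moves d s0 t ∧ doneT t)
    (hmin : ∀ j t, reachT moves j s0 t → doneT t → d ≤ j) :
    distSpec moves s0 = (d : Int) := by
  classical
  have hex : ∃ k, RK moves k s0 :=
    ⟨d, (RK_iff_reach_done moves d s0).2 ⟨d, le_refl _, hreach.choose, hreach.choose_spec⟩⟩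
  unfold distSpec
  simp only [dif_pos hex]
  have hle : Nat.find hex ≤ d :=
    Nat.find_le (h := hex) ((RK_iff_reach_done moves d s0).2 ⟨d, le_refl _, hreach.choose, hreach.choose_spec⟩)
  have hge : d ≤ Nat.find hex := by
    obtain ⟨j, hj, t, hr, hd⟩ := (RK_iff_reach_done moves (Nat.find hex) s0).1 (Nat.find_spec hex)
    have := hmin j t hr hd
    omega
  have : Nat.find hex = d := by omega
  rw [this]

theorem distSpec_eq_neg_of_no_done (moves : List PVTrip) (s0 : PVTrip)
    (h : ∀ j t, reachT moves j s0 t → ¬ doneT t) :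
    distSpec moves s0 = -1 := by
  apply (distSpec_neg_iff moves s0).2
  rintro ⟨k, hk⟩
  obtain ⟨j, _, t, hr, hd⟩ := (RK_iff_reach_done moves k s0).1 hk
  exact h j t hr hd

-- ---- the one-state expansion fold of the BFS loop ----

theorem fold_push (x y z cnt : Int) :
    ∀ (ms : List PVTrip) (q : List PVQuad) (c : PySem.Set PVTrip),
    ∃ Δ : List PVTrip,
      (ms.foldl (fun (st : List PVQuad × PySem.Set PVTrip) mv =>
          let nx := max 0 (x - mv.1)
          let ny := max 0 (y - mv.2.1)
          let nz := max 0 (z - mv.2.2)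
          if PySem.Set.contains st.2 (nx, ny, nz) then st
          else (st.1 ++ [(nx, ny, nz, cnt + 1)], PySem.Set.add st.2 (nx, ny, nz))) (q, c))
        = (q ++ Δ.map (fun t => (t.1, t.2.1, t.2.2, cnt + 1)), c ++ Δ)
      ∧ Δ.Nodup
      ∧ (∀ t ∈ Δ, t ∉ c ∧ ∃ mv ∈ ms, stepT (x, y, z) mv = t)
      ∧ (∀ mv ∈ ms, stepT (x, y, z) mv ∈ c ++ Δ) := by
  intro ms
  induction ms with
  | nil =>
    intro q c
    exact ⟨[], by simp, List.nodup_nil, by simp, by simp⟩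
  | cons mv ms ih =>
    intro q c
    simp only [List.foldl_cons]
    by_cases hc : stepT (x, y, z) mv ∈ c
    · have hct : PySem.Set.contains c (max 0 (x - mv.1), max 0 (y - mv.2.1), max 0 (z - mv.2.2)) = true :=
        (PySem.Set.contains_iff c _).2 hc
      rw [if_pos hct]
      obtain ⟨Δ, hfold, hnd, hmem, hcov⟩ := ih q c
      refine ⟨Δ, hfold, hnd, ?_, ?_⟩
      · intro t ht
        obtain ⟨hnc, mv', hmv', hst⟩ := hmem t ht
        exact ⟨hnc, mv', List.mem_cons_of_mem _ hmv', hst⟩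
      · intro mv' hmv'
        rcases List.mem_cons.1 hmv' with he | hm
        · subst he; exact List.mem_append.2 (Or.inl hc)
        · exact hcov mv' hm
    · have hct : PySem.Set.contains c (max 0 (x - mv.1), max 0 (y - mv.2.1), max 0 (z - mv.2.2)) = false := by
        rw [Bool.eq_false_iff]
        intro hh
        exact hc ((PySem.Set.contains_iff c _).1 hh)
      rw [if_neg (by simpa [stepT] using hc)]
      have hadd : PySem.Set.add c (max 0 (x - mv.1), max 0 (y - mv.2.1), max 0 (z - mv.2.2))
          = c ++ [stepT (x, y, z) mv] := PySem.Set.add_of_not_mem hc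
      rw [hadd]
      obtain ⟨Δ', hfold, hnd, hmem, hcov⟩ :=
        ih (q ++ [(max 0 (x - mv.1), max 0 (y - mv.2.1), max 0 (z - mv.2.2), cnt + 1)])
          (c ++ [stepT (x, y, z) mv])
      refine ⟨stepT (x, y, z) mv :: Δ', ?_, ?_, ?_, ?_⟩
      · rw [hfold]
        simp [stepT, List.append_assoc]
      · refine List.nodup_cons.2 ⟨?_, hnd⟩
        intro hin
        exact ((hmem _ hin).1) (List.mem_append.2 (Or.inr (by simp)))
      · intro t ht
        rcases List.mem_cons.1 ht with he | hm
        · subst he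
          exact ⟨hc, mv, by simp, rfl⟩
        · obtain ⟨hnc, mv', hmv', hst⟩ := hmem t hm
          refine ⟨fun hcc => hnc (List.mem_append.2 (Or.inl hcc)), mv', List.mem_cons_of_mem _ hmv', hst⟩
      · intro mv' hmv'
        rcases List.mem_cons.1 hmv' with he | hm
        · subst he
          exact List.mem_append.2 (Or.inr (by simp))
        · have := hcov mv' hm
          rcases List.mem_append.1 this with h1 | h2
          · rcases List.mem_append.1 h1 with h3 | h4
            · exact List.mem_append.2 (Or.inl h3)
            · simp only [List.mem_singleton] at h4
              exact List.mem_append.2 (Or.inr (by simp [h4]))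
          · exact List.mem_append.2 (Or.inr (List.mem_cons_of_mem _ h2))

theorem nodup_subset_length {α : Type} [DecidableEq α] {l l' : List α}
    (h : l.Nodup) (hs : ∀ x ∈ l, x ∈ l') : l.length ≤ l'.length := by
  calc l.length = l.toFinset.card := (List.toFinset_card_of_nodup h).symm
    _ ≤ l'.toFinset.card := Finset.card_le_card (fun x hx => by
        simp only [List.mem_toFinset] at hx ⊢
        exact hs x hx)
    _ ≤ l'.length := l'.toFinset_card_le

theorem bfsG_inv (moves : List PVTrip) (s0 : PVTrip)
    (boxL : List PVTrip) (hstep : ∀ t ∈ boxL, ∀ mv ∈ moves, stepT t mv ∈ boxL) :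
    ∀ (n fuel : ℕ) (d : ℕ) (as bs check : List PVTrip),
      n = 2 * fuel + (if as = [] then 1 else 0) →
      (∀ s ∈ as, sd? moves s0 s = some d) →
      (∀ t ∈ bs, sd? moves s0 t = some (d+1)) →
      (∀ t d', sd? moves s0 t = some d' → d' < d → ¬ doneT t) →
      (∀ s, sd? moves s0 s = some d → s ∉ as → ¬ doneT s) →
      (∀ t, t ∈ check ↔ ((∃ d' ≤ d, sd? moves s0 t = some d') ∨ t ∈ bs)) →
      (∀ t, sd? moves s0 t = some (d+1) →
          (∃ s, sd? moves s0 s = some d ∧ s ∉ as ∧ edgeT moves s t) → t ∈ bs) →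
      (as ++ bs).Nodup →
      check.Nodup →
      (∀ t ∈ as ++ bs, t ∈ check) →
      (∀ t ∈ check, t ∈ boxL) →
      as.length + bs.length + 2 * (boxL.length - check.length) + 1 ≤ fuel →
      bfsG moves fuel
          (as.map (fun s => (s.1, s.2.1, s.2.2, (d : Int)))
            ++ bs.map (fun t => (t.1, t.2.1, t.2.2, (d : Int) + 1))) check
        = distSpec moves s0 := by
  intro n
  induction n using Nat.strong_induction_on with
  | _ n IH =>
  intro fuel d as bs check hn hA hB hIrr hPop hCheck hBs hNd hCn hQC hSub hFuel
  rcases as with _ | ⟨a, as'⟩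
  · rcases bs with _ | ⟨b1, bs'⟩
    · -- queue exhausted: nothing reachable is done
      obtain ⟨f, rfl⟩ : ∃ f, fuel = f + 1 := ⟨fuel - 1, by omega⟩
      have hnolevel : ∀ u, sd? moves s0 u ≠ some (d+1) := by
        intro u hu
        obtain ⟨p, hp, he⟩ := sd?_pred moves s0 u d hu
        have : u ∈ ([] : List PVTrip) := hBs u hu ⟨p, hp, by simp, he⟩
        simp at this
      have hres : bfsG moves (f+1) ([] : List PVQuad) check = -1 := rfl
      simp only [List.map_nil, List.append_nil]
      rw [hres]
      refine (distSpec_eq_neg_of_no_done moves s0 ?_).symm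
      intro j t hr hdt
      obtain ⟨d'', hd'', hsd⟩ := sd?_of_reach moves s0 t j hr
      rcases Nat.lt_or_ge d'' d with h1 | h2
      · exact hIrr t d'' hsd h1 hdt
      · rcases Nat.eq_or_lt_of_le h2 with h3 | h4
        · exact hPop t (h3 ▸ hsd) (by simp) hdt
        · obtain ⟨u, hu⟩ := level_exists_of_le moves s0 d'' t hsd (d+1) (by omega)
          exact hnolevel u hu
    · -- start the next level
      have hall : ∀ t, sd? moves s0 t = some (d+1) → t ∈ (b1 :: bs') := by
        intro t ht
        obtain ⟨p, hp, he⟩ := sd?_pred moves s0 t d ht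
        exact hBs t ht ⟨p, hp, by simp, he⟩
      have hlt : 2 * fuel < n := by rw [hn]; simp
      have hmain := IH (2 * fuel) hlt fuel (d+1) (b1 :: bs') [] check (by simp)
        hB (by simp)
        (by
          intro t d' h hlt'
          rcases Nat.lt_or_ge d' d with h1 | h2
          · exact hIrr t d' h h1
          · have : d' = d := by omega
            exact hPop t (this ▸ h) (by simp))
        (fun s hs hns => absurd (hall s hs) hns)
        (by
          intro t
          rw [hCheck t]
          constructor
          · rintro (⟨d', hd', hsd⟩ | hbs)
            · exact Or.inl ⟨d', by omega, hsd⟩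
            · exact Or.inl ⟨d+1, le_refl _, hB t hbs⟩
          · rintro (⟨d', hd', hsd⟩ | habs)
            · rcases Nat.lt_or_ge d' (d+1) with h1 | h2
              · exact Or.inl ⟨d', by omega, hsd⟩
              · have : d' = d + 1 := by omega
                exact Or.inr (hall t (this ▸ hsd))
            · simp at habs)
        (by
          rintro t ht ⟨s, hs, hns, _⟩
          exact absurd (hall s hs) hns)
        (by simpa using hNd)
        hCn
        (by simpa using hQC)
        hSub
        (by
          simp only [List.length_cons, List.length_nil] at hFuel ⊢
          omega)
      simp only [List.map_nil, List.nil_append, List.append_nil] at hmain ⊢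
      have hcast : ((d : Int) + 1) = ((d + 1 : ℕ) : Int) := by push_cast; ring
      rw [hcast]
      exact hmain
  · -- pop one state of the current level
    obtain ⟨f, rfl⟩ : ∃ f, fuel = f + 1 := ⟨fuel - 1, by simp only [List.length_cons] at hFuel; omega⟩
    have hsda : sd? moves s0 a = some d := hA a (by simp)
    have haCheck : a ∈ check := hQC a (by simp)
    have haBox : a ∈ boxL := hSub a haCheck
    simp only [List.map_cons, List.cons_append, bfsG]
    by_cases hdone : doneT a
    · rw [if_pos (show a.1 ≤ 0 ∧ a.2.1 ≤ 0 ∧ a.2.2 ≤ 0 from hdone)]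
      refine (distSpec_eq_done_level moves s0 d
        ⟨a, (sd?_spec moves s0 a d hsda).1, hdone⟩ ?_).symm
      intro j t hr hdt
      obtain ⟨d'', hd'', hsd⟩ := sd?_of_reach moves s0 t j hr
      by_contra hlt'
      have : d'' < d := by omega
      exact hIrr t d'' hsd this hdt
    · rw [if_neg (show ¬ (a.1 ≤ 0 ∧ a.2.1 ≤ 0 ∧ a.2.2 ≤ 0) from hdone)]
      obtain ⟨Δ, hfold, hndΔ, hmemΔ, hcovΔ⟩ := fold_push a.1 a.2.1 a.2.2 (d : Int) moves
        (as'.map (fun s => (s.1, s.2.1, s.2.2, (d : Int)))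
          ++ bs.map (fun t => (t.1, t.2.1, t.2.2, (d : Int) + 1))) check
      have hmemΔ' : ∀ t ∈ Δ, t ∉ check ∧ ∃ mv ∈ moves, stepT a mv = t := hmemΔ
      have hcovΔ' : ∀ mv ∈ moves, stepT a mv ∈ check ++ Δ := hcovΔ
      rw [hfold]
      have hΔlevel : ∀ t ∈ Δ, sd? moves s0 t = some (d+1) := by
        intro t ht
        obtain ⟨hnc, mv', hmv', hst⟩ := hmemΔ' t ht
        obtain ⟨e, he, hsd⟩ := sd?_edge moves s0 a d hsda mv' hmv'
        rw [hst] at hsd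
        have hnotle : ¬ (∃ d' ≤ d, sd? moves s0 t = some d') :=
          fun hex => hnc ((hCheck t).2 (Or.inl hex))
        have he' : e = d + 1 := by
          by_contra hne
          exact hnotle ⟨e, by omega, hsd⟩
        rw [he'] at hsd
        exact hsd
      have hrw : (as'.map (fun s => (s.1, s.2.1, s.2.2, (d : Int)))
            ++ bs.map (fun t => (t.1, t.2.1, t.2.2, (d : Int) + 1)))
            ++ Δ.map (fun t => (t.1, t.2.1, t.2.2, (d : Int) + 1))
          = as'.map (fun s => (s.1, s.2.1, s.2.2, (d : Int)))
            ++ (bs ++ Δ).map (fun t => (t.1, t.2.1, t.2.2, (d : Int) + 1)) := by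
        rw [List.map_append, List.append_assoc]
      rw [hrw]
      have hsubqc : ∀ t ∈ as' ++ bs, t ∈ check := by
        intro t ht
        apply hQC
        rcases List.mem_append.1 ht with h | h
        · exact List.mem_append.2 (Or.inl (List.mem_cons_of_mem _ h))
        · exact List.mem_append.2 (Or.inr h)
      have hndab : (as' ++ bs).Nodup := by
        rw [List.cons_append] at hNd
        exact (List.nodup_cons.1 hNd).2
      apply IH (2*f + (if as' = [] then 1 else 0))
        (by rw [hn]; simp only [List.cons_ne_nil, if_neg]; split_ifs <;> omega)
        f d as' (bs ++ Δ) (check ++ Δ) rfl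
      · exact fun s hs => hA s (by simp [hs])
      · intro t ht
        rcases List.mem_append.1 ht with h | h
        · exact hB t h
        · exact hΔlevel t h
      · exact hIrr
      · intro s hs hns
        by_cases hsa : s = a
        · subst hsa; exact hdone
        · refine hPop s hs ?_
          intro hm
          rcases List.mem_cons.1 hm with h | h
          · exact hsa h
          · exact hns h
      · intro t
        constructor
        · intro ht
          rcases List.mem_append.1 ht with hc | hΔ
          · rcases (hCheck t).1 hc with he | hbs
            · exact Or.inl he
            · exact Or.inr (List.mem_append.2 (Or.inl hbs))
          · exact Or.inr (List.mem_append.2 (Or.inr hΔ))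
        · rintro (he | hbsΔ)
          · exact List.mem_append.2 (Or.inl ((hCheck t).2 (Or.inl he)))
          · rcases List.mem_append.1 hbsΔ with h | h
            · exact List.mem_append.2 (Or.inl ((hCheck t).2 (Or.inr h)))
            · exact List.mem_append.2 (Or.inr h)
      · rintro t ht ⟨s, hs, hns, he⟩
        by_cases hsa : s = a
        · subst hsa
          obtain ⟨mv', hmv', hst⟩ := he
          have hin := hcovΔ' mv' hmv'
          rw [hst] at hin
          rcases List.mem_append.1 hin with hc | hΔ
          · rcases (hCheck t).1 hc with ⟨d', hd', hsd'⟩ | hbs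
            · have := sd?_fun moves s0 t (d+1) d' ht hsd'
              omega
            · exact List.mem_append.2 (Or.inl hbs)
          · exact List.mem_append.2 (Or.inr hΔ)
        · have hns' : s ∉ (a :: as') := by
            intro hm
            rcases List.mem_cons.1 hm with h | h
            · exact hsa h
            · exact hns h
          exact List.mem_append.2 (Or.inl (hBs t ht ⟨s, hs, hns', he⟩))
      · rw [← List.append_assoc]
        rw [List.nodup_append]
        refine ⟨hndab, hndΔ, ?_⟩
        rintro t ht u hu rfl
        exact (hmemΔ' t hu).1 (hsubqc t ht)
      · rw [List.nodup_append]
        refine ⟨hCn, hndΔ, ?_⟩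
        rintro t ht u hu rfl
        exact (hmemΔ' t hu).1 ht
      · intro t ht
        rcases List.mem_append.1 ht with h | h
        · exact List.mem_append.2 (Or.inl (hsubqc t (List.mem_append.2 (Or.inl h))))
        · rcases List.mem_append.1 h with h1 | h2
          · exact List.mem_append.2 (Or.inl (hsubqc t (List.mem_append.2 (Or.inr h1))))
          · exact List.mem_append.2 (Or.inr h2)
      · intro t ht
        rcases List.mem_append.1 ht with h | h
        · exact hSub t h
        · obtain ⟨_, mv', hmv', hst⟩ := hmemΔ' t h
          rw [← hst]
          exact hstep a haBox mv' hmv'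
      · have hlen : (check ++ Δ).length ≤ boxL.length := by
          apply nodup_subset_length
          · rw [List.nodup_append]
            refine ⟨hCn, hndΔ, ?_⟩
            rintro t ht u hu rfl
            exact (hmemΔ' t hu).1 ht
          · intro t ht
            rcases List.mem_append.1 ht with h | h
            · exact hSub t h
            · obtain ⟨_, mv', hmv', hst⟩ := hmemΔ' t h
              rw [← hst]
              exact hstep a haBox mv' hmv'
        simp only [List.length_append, List.length_cons] at hFuel hlen ⊢
        omega

theorem bfsG_main (moves : List PVTrip) (s0 : PVTrip)
    (boxL : List PVTrip) (hs0 : s0 ∈ boxL)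
    (hstep : ∀ t ∈ boxL, ∀ mv ∈ moves, stepT t mv ∈ boxL)
    (fuel : ℕ) (hfuel : 2 * boxL.length + 2 ≤ fuel) :
    bfsG moves fuel [(s0.1, s0.2.1, s0.2.2, 0)] [s0] = distSpec moves s0 := by
  have hbox1 : 1 ≤ boxL.length := List.length_pos_iff.2 (List.ne_nil_of_mem hs0)
  have h := bfsG_inv moves s0 boxL hstep (2 * fuel) fuel 0 [s0] [] [s0]
    (by simp)
    (by intro s hs; simp only [List.mem_singleton] at hs; rw [hs]; exact sd?_self moves s0)
    (by simp)
    (by intro t d' _ h; omega)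
    (by
      intro s hs hns
      exact absurd (by simp [sd?_zero moves s0 s hs]) hns)
    (by
      intro t
      simp only [List.mem_singleton]
      constructor
      · intro ht; rw [ht]; exact Or.inl ⟨0, le_refl _, sd?_self moves s0⟩
      · rintro (⟨d', hd', hsd⟩ | habs)
        · interval_cases d'
          exact sd?_zero moves s0 t hsd
        · simp at habs)
    (by
      rintro t ht ⟨s, hs, hns, _⟩
      exact absurd (by simp [sd?_zero moves s0 s hs]) hns)
    (by simp)
    (by simp)
    (by simp)
    (by intro t ht; simp only [List.mem_singleton] at ht; subst ht; exact hs0)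
    (by simp only [List.length_singleton, List.length_nil]; omega)
  simpa using h

-- ---- glue ----

theorem padTo3_shape (l : List Int) (h : l.length ≤ 3) :
    ∃ a b c : Int, padTo3 l = [a, b, c] := by
  match l, h with
  | [], _ =>
    refine ⟨0, 0, 0, ?_⟩
    rw [padTo3]; norm_num
    rw [padTo3]; norm_num
    rw [padTo3]; norm_num
    rw [padTo3]; norm_num
  | [a], _ =>
    refine ⟨a, 0, 0, ?_⟩
    rw [padTo3]; norm_num
    rw [padTo3]; norm_num
    rw [padTo3]; norm_num
  | [a, b], _ =>
    refine ⟨a, b, 0, ?_⟩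
    rw [padTo3]; norm_num
    rw [padTo3]; norm_num
  | [a, b, c], _ =>
    refine ⟨a, b, c, ?_⟩
    rw [padTo3]; norm_num

theorem padTo3B_eq (l : List Int) (h : l.length ≤ 3) : padTo3B l = padTo3 l := by
  match l, h with
  | [], _ =>
    have hA : padTo3 ([] : List Int) = [0, 0, 0] := by
      rw [padTo3]; norm_num; rw [padTo3]; norm_num; rw [padTo3]; norm_num
      rw [padTo3]; norm_num
    have hB : padTo3B ([] : List Int) = [0, 0, 0] := by
      rw [padTo3B]; norm_num; rw [padTo3B]; norm_num; rw [padTo3B]; norm_num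
      rw [padTo3B]; norm_num
    rw [hA, hB]
  | [a], _ =>
    have hA : padTo3 [a] = [a, 0, 0] := by
      rw [padTo3]; norm_num; rw [padTo3]; norm_num; rw [padTo3]; norm_num
    have hB : padTo3B [a] = [a, 0, 0] := by
      rw [padTo3B]; norm_num; rw [padTo3B]; norm_num; rw [padTo3B]; norm_num
    rw [hA, hB]
  | [a, b], _ =>
    have hA : padTo3 [a, b] = [a, b, 0] := by
      rw [padTo3]; norm_num; rw [padTo3]; norm_num
    have hB : padTo3B [a, b] = [a, b, 0] := by
      rw [padTo3B]; norm_num; rw [padTo3B]; norm_num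
    rw [hA, hB]
  | [a, b, c], _ =>
    have hA : padTo3 [a, b, c] = [a, b, c] := by rw [padTo3]; norm_num
    have hB : padTo3B [a, b, c] = [a, b, c] := by rw [padTo3B]; norm_num
    rw [hA, hB]

def boxList (M : Int) : List PVTrip :=
  (PySem.List.pyRange 0 (M+1) 1).flatMap (fun x =>
    (PySem.List.pyRange 0 (M+1) 1).flatMap (fun y =>
      (PySem.List.pyRange 0 (M+1) 1).map (fun z => (x, y, z))))

theorem mem_boxList (M : Int) (t : PVTrip) :
    t ∈ boxList M ↔ (0 ≤ t.1 ∧ t.1 ≤ M ∧ 0 ≤ t.2.1 ∧ t.2.1 ≤ M ∧ 0 ≤ t.2.2 ∧ t.2.2 ≤ M) := by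
  obtain ⟨x, y, z⟩ := t
  simp only [boxList, List.mem_flatMap, List.mem_map, PySem.List.mem_pyRange_one,
    Prod.mk.injEq]
  constructor
  · rintro ⟨x', ⟨hx1, hx2⟩, y', ⟨hy1, hy2⟩, z', ⟨hz1, hz2⟩, rfl, rfl, rfl⟩
    omega
  · rintro ⟨h1, h2, h3, h4, h5, h6⟩
    exact ⟨x, ⟨h1, by omega⟩, y, ⟨h3, by omega⟩, z, ⟨h5, by omega⟩, rfl, rfl, rfl⟩

theorem boxList_length_le (M : Int) :
    (boxList M).length ≤ (M+1).toNat * (M+1).toNat * (M+1).toNat := by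
  have hinner : ∀ x y : Int,
      ((PySem.List.pyRange 0 (M+1) 1).map (fun z => ((x, y, z) : PVTrip))).length
        = (M+1).toNat := by
    intro x y
    rw [List.length_map, PySem.List.length_pyRange_one]
    norm_num
  have hmid : ∀ x : Int,
      ((PySem.List.pyRange 0 (M+1) 1).flatMap (fun y =>
        (PySem.List.pyRange 0 (M+1) 1).map (fun z => ((x, y, z) : PVTrip)))).length
        ≤ (M+1).toNat * (M+1).toNat := by
    intro x
    rw [List.length_flatMap]
    calc ((PySem.List.pyRange 0 (M+1) 1).map (fun y =>
          ((PySem.List.pyRange 0 (M+1) 1).map (fun z => ((x, y, z) : PVTrip))).length)).sum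
        ≤ ((PySem.List.pyRange 0 (M+1) 1).map (fun y =>
          ((PySem.List.pyRange 0 (M+1) 1).map (fun z => ((x, y, z) : PVTrip))).length)).length
            • (M+1).toNat := by
          apply List.sum_le_card_nsmul
          intro w hw
          rcases List.mem_map.1 hw with ⟨y, _, rfl⟩
          rw [hinner]
      _ ≤ (M+1).toNat * (M+1).toNat := by
          rw [List.length_map, PySem.List.length_pyRange_one, smul_eq_mul]
          norm_num
  rw [boxList, List.length_flatMap]
  calc ((PySem.List.pyRange 0 (M+1) 1).map (fun x =>
        ((PySem.List.pyRange 0 (M+1) 1).flatMap (fun y =>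
          (PySem.List.pyRange 0 (M+1) 1).map (fun z => ((x, y, z) : PVTrip)))).length)).sum
      ≤ ((PySem.List.pyRange 0 (M+1) 1).map (fun x =>
        ((PySem.List.pyRange 0 (M+1) 1).flatMap (fun y =>
          (PySem.List.pyRange 0 (M+1) 1).map (fun z => ((x, y, z) : PVTrip)))).length)).length
          • ((M+1).toNat * (M+1).toNat) := by
        apply List.sum_le_card_nsmul
        intro w hw
        rcases List.mem_map.1 hw with ⟨x, _, rfl⟩
        exact hmid x
    _ ≤ (M+1).toNat * (M+1).toNat * (M+1).toNat := by
        rw [List.length_map, PySem.List.length_pyRange_one, smul_eq_mul]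
        norm_num
        ring_nf
        omega

theorem step_mem_boxList (M : Int) (t mv : PVTrip) (hmv : NonnegMv mv) (hM : 0 ≤ M)
    (ht : t.1 ≤ M ∧ t.2.1 ≤ M ∧ t.2.2 ≤ M) : stepT t mv ∈ boxList M := by
  obtain ⟨x, y, z⟩ := t
  obtain ⟨d1, d2, d3⟩ := mv
  obtain ⟨h1, h2, h3⟩ := hmv
  rw [mem_boxList]
  simp only [stepT] at *
  refine ⟨?_, ?_, ?_, ?_, ?_, ?_⟩ <;> simp_all <;> omega

theorem movesA_nonneg (N : Int) (hN : N ≤ 3) : ∀ mv ∈ movesA N, NonnegMv mv := by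
  by_cases h0 : 0 ≤ N
  · simp only [NonnegMv]
    interval_cases N <;> decide
  · rw [movesA_nil N (by omega)]
    simp

theorem movesB_nonneg (N : Int) (hN : N ≤ 3) : ∀ mv ∈ movesB N, NonnegMv mv := by
  by_cases h0 : 0 ≤ N
  · simp only [NonnegMv]
    interval_cases N <;> decide
  · rw [movesB_zero N (by omega)]
    simp [NonnegMv]

theorem distSpec_moves_eq (N : Int) (hN : N ≤ 3) (s : PVTrip) :
    distSpec (movesA N) s = distSpec (movesB N) s := by
  by_cases h0 : 0 < N
  · have : movesA N = movesB N := by interval_cases N <;> decide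
    rw [this]
  · by_cases h00 : N = 0
    · have : movesA N = movesB N := by subst h00; decide
      rw [this]
    · rw [movesA_nil N (by omega), movesB_zero N (by omega)]
      exact distSpec_nil_zero s

theorem validMemo_empty (moves : List PVTrip) : ValidMemo moves PySem.Dict.empty := by
  intro s v h
  rw [PySem.Dict.get?_empty] at h
  cases h

theorem solution_spec' (N : Int) (nums : List Int) (hpre : Pre_solution N nums) :
    solution N nums = solution_alt N nums := by
  obtain ⟨hN, hlen⟩ := hpre
  obtain ⟨a, b, c, hpad⟩ := padTo3_shape nums hlen
  have hpadB : padTo3B nums = [a, b, c] := by rw [padTo3B_eq nums hlen, hpad]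
  unfold solution solution_alt
  rw [hpad, hpadB]
  show bfsA N (possibleOf N)
      (2 * (((max 0 (max a (max b c)))+1) * ((max 0 (max a (max b c)))+1)
        * ((max 0 (max a (max b c)))+1)).toNat + 8)
      [(a, b, c, 0)] (PySem.Set.ofList [(a, b, c)])
    = (fB (movesB N) (mmB (a, b, c) + 1) (a, b, c) PySem.Dict.empty).1
  set M := max 0 (max a (max b c)) with hM
  have hM0 : 0 ≤ M := le_max_left _ _
  have hca : a ≤ M := by rw [hM]; omega
  have hcb : b ≤ M := by rw [hM]; omega
  have hcc : c ≤ M := by rw [hM]; omega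
  have hofL : PySem.Set.ofList [((a, b, c) : PVTrip)] = [(a, b, c)] := rfl
  rw [hofL, bfsA_eq_bfsG]
  have hstep : ∀ t ∈ ((a, b, c) : PVTrip) :: boxList M, ∀ mv ∈ movesA N,
      stepT t mv ∈ ((a, b, c) : PVTrip) :: boxList M := by
    intro t ht mv hmv
    apply List.mem_cons_of_mem
    rcases List.mem_cons.1 ht with rfl | hbx
    · exact step_mem_boxList M _ mv (movesA_nonneg N hN mv hmv) hM0 ⟨hca, hcb, hcc⟩
    · have := (mem_boxList M t).1 hbx
      exact step_mem_boxList M t mv (movesA_nonneg N hN mv hmv) hM0 ⟨this.2.1, this.2.2.2.1, this.2.2.2.2.2⟩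
  have htn : ((M+1) * (M+1) * (M+1)).toNat = (M+1).toNat * (M+1).toNat * (M+1).toNat := by
    rw [Int.toNat_mul (by positivity) (by omega), Int.toNat_mul (by omega) (by omega)]
  have hfuel : 2 * (((a, b, c) : PVTrip) :: boxList M).length + 2
      ≤ 2 * ((M+1) * (M+1) * (M+1)).toNat + 8 := by
    have := boxList_length_le M
    simp only [List.length_cons]
    omega
  rw [bfsG_main (movesA N) (a, b, c) (((a, b, c) : PVTrip) :: boxList M) (by simp) hstep _ hfuel]
  have hB := (fB_correct (movesB N) (movesB_nonneg N hN) (mmB (a, b, c) + 1) (a, b, c)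
    PySem.Dict.empty (by omega) (validMemo_empty _)).1
  rw [hB]
  exact distSpec_moves_eq N hN (a, b, c)

-- ===== VERDICT (by name: the statement is the Claim_ definition above) =====
theorem solution_spec : Claim_equal_solution := by
  intro N nums _ hpre
  unfold Spec_solution
  exact solution_spec' N nums hpre
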